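-- pv_equiv track=rewrite | github.com/rsmolarz/MarketAgent | meta/cluster_ensemble.py | build_clusters_from_pairs
-- ===== SOURCE A (Python) =====
-- from collections import defaultdict
-- from typing import Dict, List, Tuple
--
-- def build_clusters_from_pairs(redundant_pairs: List[Tuple[str, str]]) -> List[List[str]]:
--     """
--     Given redundant pairs (a,b) meaning correlated, form clusters.
--     """
--     parent = {}
--
--     def find(x):
--         parent.setdefault(x, x)
--         while parent[x] != x:
--             parent[x] = parent[parent[x]]
--             x = parent[x]
--         return x
--
--     def union(a, b):
--         ra, rb = find(a), find(b)
--         if ra != rb: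
--             parent[rb] = ra
--
--     for a, b in redundant_pairs:
--         union(a, b)
--
--     groups = defaultdict(list)
--     for x in list(parent.keys()):
--         groups[find(x)].append(x)
--
--     return [sorted(v) for v in groups.values() if len(v) >= 2]
-- ===== SOURCE B (Python) =====
-- from typing import List, Tuple
--
-- def build_clusters_from_pairs(redundant_pairs: List[Tuple[str, str]]) -> List[List[str]]:
--     """
--     Given redundant pairs (a,b) meaning correlated, form clusters.
--     Incrementally merges explicit cluster lists instead of a union-find forest.
--     """
--     comps: List[List[str]] = []
--     for a, b in redundant_pairs:
--         ia = next((i for i, c in enumerate(comps) if a in c), -1)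
--         if ia == -1:
--             comps.append([a])
--             ia = len(comps) - 1
--         ib = next((i for i, c in enumerate(comps) if b in c), -1)
--         if ib == -1:
--             comps.append([b])
--             ib = len(comps) - 1
--         if ia != ib:
--             i, j = (ia, ib) if ia < ib else (ib, ia)
--             comps[i] = comps[i] + comps[j]
--             del comps[j]
--     return [sorted(c) for c in comps if len(c) >= 2]
-- ===== Notes on version B (the rewrite author's own statement) =====
-- stated objective: alternative
-- what changed: Replaced the path-compressing union-find forest (parent dict + find/union, then a grouping pass) by direct incremental merging of explicit cluster lists: for each pair, locate the clusters holding each endpoint, create singletons for unseen names, and merge the later cluster into the earlier one.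
import Mathlib
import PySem

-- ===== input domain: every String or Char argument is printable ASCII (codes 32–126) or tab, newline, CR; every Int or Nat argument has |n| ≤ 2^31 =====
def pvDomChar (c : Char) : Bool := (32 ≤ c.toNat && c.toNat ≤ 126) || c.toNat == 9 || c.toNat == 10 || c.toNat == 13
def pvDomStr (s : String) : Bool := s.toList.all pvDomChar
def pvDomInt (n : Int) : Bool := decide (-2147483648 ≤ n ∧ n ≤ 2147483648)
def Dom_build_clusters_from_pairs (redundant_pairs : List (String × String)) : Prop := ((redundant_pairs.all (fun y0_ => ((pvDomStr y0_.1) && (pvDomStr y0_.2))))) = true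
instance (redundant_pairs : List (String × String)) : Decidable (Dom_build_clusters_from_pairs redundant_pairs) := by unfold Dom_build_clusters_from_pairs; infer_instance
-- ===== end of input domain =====

-- B replaces A's path-compressing union-find forest by direct incremental merging of
-- explicit cluster lists (alternative decomposition, no speed claim).

-- ===== PORT A =====
-- the body of Python's `while parent[x] != x` loop inside find; fuel (= dict size at
-- entry) only makes the loop total in Lean, it is never exhausted on a union-find forest
def findLoopA : Nat → PySem.Dict String String → String → String × PySem.Dict String String
  | 0, p, x => (x, p)
  | Nat.succ f, p, x =>
    let px := p.getD x x              -- parent[x]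
    if px = x then (x, p)
    else
      let gx := p.getD px px          -- parent[parent[x]]
      findLoopA f (p.insert x gx) gx  -- parent[x] = parent[parent[x]]; x = parent[x]

-- def find(x): parent.setdefault(x, x); while ...; return x   (returns root and updated dict)
def findA (p : PySem.Dict String String) (x : String) : String × PySem.Dict String String :=
  let p1 := p.setdefault x x
  findLoopA p1.size p1 x

-- def union(a, b)
def unionA (p : PySem.Dict String String) (a b : String) : PySem.Dict String String :=
  let ra := (findA p a).1
  let p1 := (findA p a).2
  let rb := (findA p1 b).1
  let p2 := (findA p1 b).2
  if ra ≠ rb then p2.insert rb ra else p2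

def build_clusters_from_pairs (redundant_pairs : List (String × String)) : List (List String) :=
  let parent := redundant_pairs.foldl (fun p ab => unionA p ab.1 ab.2) PySem.Dict.empty
  -- groups = defaultdict(list); for x in list(parent.keys()): groups[find(x)].append(x)
  let gp := parent.keys.foldl
      (fun (st : PySem.Dict String (List String) × PySem.Dict String String) x =>
        let r := (findA st.2 x).1
        let p' := (findA st.2 x).2
        (st.1.insert r (st.1.getD r [] ++ [x]), p'))
      (PySem.Dict.empty, parent)
  (gp.1.values.filter (fun v => decide (2 ≤ v.length))).map
    (fun v => PySem.List.sorted v (fun s => s) false)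

-- ===== PORT B =====
-- one pass of B's loop body: find (or create) the clusters of a and b, merge later into earlier
def stepB (comps : List (List String)) (a b : String) : List (List String) :=
  let fa : List (List String) × Nat := match comps.findIdx? (fun c => c.contains a) with
    | some i => (comps, i)
    | none => (comps ++ [[a]], comps.length)
  let comps1 := fa.1
  let ia := fa.2
  let fb : List (List String) × Nat := match comps1.findIdx? (fun c => c.contains b) with
    | some i => (comps1, i)
    | none => (comps1 ++ [[b]], comps1.length)
  let comps2 := fb.1
  let ib := fb.2
  if ia = ib then comps2
  else
    let i := min ia ib
    let j := max ia ib
    (comps2.set i (comps2.getD i [] ++ comps2.getD j [])).eraseIdx j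

def build_clusters_from_pairs_alt (redundant_pairs : List (String × String)) : List (List String) :=
  let comps := redundant_pairs.foldl (fun cs ab => stepB cs ab.1 ab.2) []
  (comps.filter (fun c => decide (2 ≤ c.length))).map
    (fun c => PySem.List.sorted c (fun s => s) false)

-- ===== PRECONDITION & SPEC =====
def Spec_build_clusters_from_pairs (redundant_pairs : List (String × String)) (out : List (List String)) : Prop := out = build_clusters_from_pairs_alt redundant_pairs
instance (redundant_pairs : List (String × String)) (out : List (List String)) : Decidable (Spec_build_clusters_from_pairs redundant_pairs out) := by unfold Spec_build_clusters_from_pairs; infer_instance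

-- ===== CLAIM (what is proved, stated in full; the proofs are below) =====
def Claim_equal_build_clusters_from_pairs : Prop := ∀ (redundant_pairs : List (String × String)), Dom_build_clusters_from_pairs redundant_pairs → Spec_build_clusters_from_pairs redundant_pairs (build_clusters_from_pairs redundant_pairs)

-- ===== LEMMAS AND PROOFS =====

-- ---- abstract view of A's parent dict: step function, iteration, roots ----
def pstep (p : PySem.Dict String String) (x : String) : String := p.getD x x

def iterP (p : PySem.Dict String String) : Nat → String → String
  | 0, x => x
  | n+1, x => iterP p n (pstep p x)

def IsRootP (p : PySem.Dict String String) (x : String) : Prop := pstep p x = x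

def RtP (p : PySem.Dict String String) (x : String) : String := iterP p p.size x

def WFP (p : PySem.Dict String String) : Prop :=
  p.keys.Nodup ∧ (∀ x ∈ p.keys, pstep p x ∈ p.keys) ∧ (∀ x, ∃ n, IsRootP p (iterP p n x))

-- ---- abstract view of B's state: key list and root map evolution ----
def addK (ks : List String) (x : String) : List String := if x ∈ ks then ks else ks ++ [x]

def mergeρ (ρ : String → String) (a b : String) (z : String) : String :=
  if ρ a = ρ b then ρ z else if ρ z = ρ b then ρ a else ρ z

def canonV (ks : List String) (ρ : String → String) : List (List String) :=
  (PySem.List.dedup (ks.map ρ)).map (fun r => ks.filter (fun x => decide (ρ x = r)))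

theorem iterP_add (p : PySem.Dict String String) (m n : Nat) (x : String) :
    iterP p (m + n) x = iterP p m (iterP p n x) := by
  induction n generalizing x with
  | zero => rfl
  | succ n ih => rw [show m + (n+1) = (m+n) + 1 from rfl]; simp only [iterP]; exact ih _

theorem iterP_root (p : PySem.Dict String String) (n : Nat) (r : String)
    (h : IsRootP p r) : iterP p n r = r := by
  induction n with
  | zero => rfl
  | succ n ih => simp only [iterP]; rw [show pstep p r = r from h]; exact ih

theorem iterP_absorb (p : PySem.Dict String String) (k n : Nat) (x : String)
    (h : IsRootP p (iterP p k x)) (hkn : k ≤ n) : iterP p n x = iterP p k x := by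
  have : n = (n - k) + k := by omega
  rw [this, iterP_add]; exact iterP_root _ _ _ h

theorem pstep_of_not_mem (p : PySem.Dict String String) (x : String)
    (hx : x ∉ p.keys) : pstep p x = x := by
  unfold pstep
  have hc : p.contains x = false := by
    rw [PySem.Dict.contains_eq_decide_mem_keys]; simp [hx]
  exact PySem.Dict.getD_of_not_contains p x hc

theorem iterP_mem_keys (p : PySem.Dict String String)
    (hcl : ∀ x ∈ p.keys, pstep p x ∈ p.keys) (n : Nat) (x : String)
    (hx : x ∈ p.keys) : iterP p n x ∈ p.keys := by
  induction n generalizing x with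
  | zero => exact hx
  | succ n ih => exact ih _ (hcl _ hx)

theorem root_reach_lt_size (p : PySem.Dict String String) (hwf : WFP p) (x : String)
    (hx : x ∈ p.keys) : ∃ k, k < p.size ∧ IsRootP p (iterP p k x) := by
  have hex := hwf.2.2 x
  letI : DecidablePred (fun n => IsRootP p (iterP p n x)) := fun n => by
    unfold IsRootP; infer_instance
  have hroot : IsRootP p (iterP p (Nat.find hex) x) := Nat.find_spec hex
  have hmin : ∀ i < Nat.find hex, ¬ IsRootP p (iterP p i x) := fun i hi => Nat.find_min hex hi
  set d := Nat.find hex with hd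
  have hinj : ∀ i j, i < j → j ≤ d → iterP p i x ≠ iterP p j x := by
    intro i j hij hjd heq
    have h1 : iterP p (d - j + i) x = iterP p d x := by
      rw [iterP_add, heq, ← iterP_add]; congr 1; omega
    exact hmin (d - j + i) (by omega) (h1 ▸ hroot)
  have hnd : ((List.range (d+1)).map (fun i => iterP p i x)).Nodup := by
    refine List.Nodup.map_on ?_ List.nodup_range
    intro i hi j hj hfe
    simp only [List.mem_range] at hi hj
    by_contra hne
    rcases Nat.lt_or_ge i j with h | h
    · exact hinj i j h (by omega) hfe
    · exact hinj j i (by omega) (by omega) hfe.symm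
  have hsub : (List.range (d+1)).map (fun i => iterP p i x) ⊆ p.keys := by
    intro y hy
    simp only [List.mem_map, List.mem_range] at hy
    obtain ⟨i, _, rfl⟩ := hy
    exact iterP_mem_keys p hwf.2.1 _ _ hx
  have hlen : d + 1 ≤ p.keys.length := by
    have := (List.subperm_of_subset hnd hsub).length_le
    simpa using this
  have hsz : p.keys.length = p.size := by
    simp [PySem.Dict.keys, PySem.Dict.size]
  exact ⟨d, by omega, hroot⟩

theorem reach_le_size (p : PySem.Dict String String) (hwf : WFP p) (z : String) :
    ∃ k, k ≤ p.size ∧ IsRootP p (iterP p k z) := by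
  by_cases hz : z ∈ p.keys
  · obtain ⟨k, hk, hr⟩ := root_reach_lt_size p hwf z hz
    exact ⟨k, by omega, hr⟩
  · exact ⟨0, by omega, pstep_of_not_mem p z hz⟩

theorem reach_lt_size (p : PySem.Dict String String) (hwf : WFP p) (hsz : 1 ≤ p.size)
    (z : String) : ∃ k, k < p.size ∧ IsRootP p (iterP p k z) := by
  by_cases hz : z ∈ p.keys
  · exact root_reach_lt_size p hwf z hz
  · exact ⟨0, by omega, pstep_of_not_mem p z hz⟩

theorem RtP_eq_of_reach (p : PySem.Dict String String) (k : Nat) (x : String)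
    (h : IsRootP p (iterP p k x)) (hk : k ≤ p.size) : RtP p x = iterP p k x :=
  iterP_absorb _ _ _ _ h hk

theorem RtP_root (p : PySem.Dict String String) (hwf : WFP p) (x : String) :
    IsRootP p (RtP p x) := by
  obtain ⟨k, hk, hroot⟩ := reach_le_size p hwf x
  rw [RtP, iterP_absorb p k p.size x hroot hk]
  exact hroot

theorem RtP_mem_keys (p : PySem.Dict String String) (hwf : WFP p) (x : String)
    (hx : x ∈ p.keys) : RtP p x ∈ p.keys :=
  iterP_mem_keys p hwf.2.1 _ _ hx

theorem RtP_of_not_mem (p : PySem.Dict String String) (x : String)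
    (hx : x ∉ p.keys) : RtP p x = x :=
  iterP_root _ _ _ (pstep_of_not_mem p x hx)

theorem iterP_ext (p p' : PySem.Dict String String)
    (h : ∀ z, pstep p' z = pstep p z) (n : Nat) (x : String) :
    iterP p' n x = iterP p n x := by
  induction n generalizing x with
  | zero => rfl
  | succ n ih => simp only [iterP, h]; exact ih _

-- ---- setdefault on a fresh key ----
theorem fresh_spec (p : PySem.Dict String String) (hwf : WFP p) (x : String)
    (hx : x ∉ p.keys) :
    WFP (p.insert x x) ∧ (p.insert x x).keys = p.keys ++ [x] ∧
    (p.insert x x).size = p.size + 1 ∧ (∀ z, RtP (p.insert x x) z = RtP p z) := by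
  have hc : p.contains x = false := by
    rw [PySem.Dict.contains_eq_decide_mem_keys]; simp [hx]
  have hkeys : (p.insert x x).keys = p.keys ++ [x] :=
    PySem.Dict.keys_insert_of_not_contains p x hc
  have hsize : (p.insert x x).size = p.size + 1 := by
    simp [PySem.Dict.size_insert, hc]
  have hstep : ∀ z, pstep (p.insert x x) z = pstep p z := by
    intro z
    unfold pstep
    by_cases hz : z = x
    · rw [hz]
      show (p.insert x x).getD x x = p.getD x x
      rw [PySem.Dict.getD_insert_self]
      exact (pstep_of_not_mem p x hx).symm
    · show (p.insert x x).getD z z = p.getD z z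
      rw [PySem.Dict.getD_insert_of_ne _ _ _ hz]
  have hiter : ∀ n w, iterP (p.insert x x) n w = iterP p n w := iterP_ext _ _ hstep
  refine ⟨⟨?_, ?_, ?_⟩, hkeys, hsize, ?_⟩
  · rw [hkeys]
    refine List.Nodup.append hwf.1 (List.nodup_singleton x) ?_
    simpa [List.disjoint_singleton] using hx
  · intro z hz
    rw [hkeys] at hz ⊢
    rw [hstep]
    rcases List.mem_append.1 hz with h | h
    · exact List.mem_append.2 (Or.inl (hwf.2.1 z h))
    · simp only [List.mem_singleton] at h
      rw [h, pstep_of_not_mem p x hx]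
      simp
  · intro z
    obtain ⟨n, hn⟩ := hwf.2.2 z
    refine ⟨n, ?_⟩
    unfold IsRootP at hn ⊢
    rw [hiter, hstep]
    exact hn
  · intro z
    unfold RtP
    rw [hiter, hsize]
    obtain ⟨k, hk, hroot⟩ := reach_le_size p hwf z
    rw [iterP_absorb p k _ z hroot (by omega), iterP_absorb p k _ z hroot hk]

-- ---- path-compression step ----
theorem comp_spec (p : PySem.Dict String String) (hwf : WFP p) (x : String)
    (hx : x ∈ p.keys) (hnr : ¬ IsRootP p x) :
    WFP (p.insert x (pstep p (pstep p x))) ∧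
    (p.insert x (pstep p (pstep p x))).keys = p.keys ∧
    (p.insert x (pstep p (pstep p x))).size = p.size ∧
    (∀ z, RtP (p.insert x (pstep p (pstep p x))) z = RtP p z) ∧
    (∀ n z, IsRootP p (iterP p n z) →
      iterP (p.insert x (pstep p (pstep p x))) n z = iterP p n z) ∧
    (∀ r, IsRootP p r → IsRootP (p.insert x (pstep p (pstep p x))) r) := by
  set gx := pstep p (pstep p x) with hgx
  set p' := p.insert x gx with hp'
  have hc : p.contains x = true := by
    rw [PySem.Dict.contains_eq_decide_mem_keys]; simp [hx]
  have hkeys : p'.keys = p.keys := PySem.Dict.keys_insert_of_contains p gx hc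
  have hsize : p'.size = p.size := by
    simp [hp', PySem.Dict.size_insert, hc]
  have hstep' : ∀ z, z ≠ x → pstep p' z = pstep p z := by
    intro z hz
    show p'.getD z z = p.getD z z
    rw [hp', PySem.Dict.getD_insert_of_ne _ _ _ hz]
  have hstepx : pstep p' x = gx := by
    show p'.getD x x = gx
    rw [hp', PySem.Dict.getD_insert_self]
  have hshift : ∀ n z, ∃ e, iterP p' n z = iterP p (n + e) z := by
    intro n
    induction n with
    | zero => intro z; exact ⟨0, rfl⟩
    | succ n ih =>
      intro z
      by_cases hz : z = x
      · obtain ⟨e, he⟩ := ih gx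
        refine ⟨e + 1, ?_⟩
        have h1 : iterP p' (n+1) z = iterP p' n gx := by
          simp only [iterP]
          rw [hz, hstepx]
        have h2 : iterP p (n + 1 + (e + 1)) z = iterP p (n + e) gx := by
          rw [show n + 1 + (e + 1) = (n + e) + 2 by omega, iterP_add, hz]
          rfl
        rw [h1, he, h2]
      · obtain ⟨e, he⟩ := ih (pstep p z)
        refine ⟨e, ?_⟩
        have h1 : iterP p' (n+1) z = iterP p' n (pstep p z) := by
          simp only [iterP]
          rw [hstep' z hz]
        have h2 : iterP p (n + 1 + e) z = iterP p (n + e) (pstep p z) := by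
          rw [show n + 1 + e = (n + e) + 1 by omega]
          rfl
        rw [h1, he, h2]
  have hreach : ∀ n z, IsRootP p (iterP p n z) → iterP p' n z = iterP p n z := by
    intro n z h
    obtain ⟨e, he⟩ := hshift n z
    rw [he]
    exact iterP_absorb p n (n + e) z h (by omega)
  have hrootpres : ∀ r, IsRootP p r → IsRootP p' r := by
    intro r hr
    have hrx : r ≠ x := fun h => hnr (h ▸ hr)
    unfold IsRootP
    rw [hstep' r hrx]
    exact hr
  refine ⟨⟨?_, ?_, ?_⟩, hkeys, hsize, ?_, hreach, hrootpres⟩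
  · rw [hkeys]; exact hwf.1
  · intro z hz
    rw [hkeys] at hz ⊢
    by_cases hzx : z = x
    · subst hzx
      rw [hstepx, hgx]
      exact hwf.2.1 _ (hwf.2.1 _ hx)
    · rw [hstep' z hzx]
      exact hwf.2.1 z hz
  · intro z
    obtain ⟨k, _, hroot⟩ := reach_le_size p hwf z
    refine ⟨k, ?_⟩
    unfold IsRootP
    rw [hreach k z hroot]
    exact hrootpres _ hroot
  · intro z
    unfold RtP
    rw [hsize]
    obtain ⟨k, hk, hroot⟩ := reach_le_size p hwf z
    have h2 : iterP p' p.size z = iterP p' k z := by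
      refine iterP_absorb p' k p.size z ?_ hk
      unfold IsRootP
      rw [hreach k z hroot]
      exact hrootpres _ hroot
    rw [h2, hreach k z hroot, iterP_absorb p k p.size z hroot hk]

-- ---- root merge (parent[rb] = ra) ----
theorem merge_spec (p : PySem.Dict String String) (hwf : WFP p) (ra rb : String)
    (hra : ra ∈ p.keys) (hrb : rb ∈ p.keys) (hraR : IsRootP p ra) (hrbR : IsRootP p rb)
    (hne : ra ≠ rb) :
    WFP (p.insert rb ra) ∧ (p.insert rb ra).keys = p.keys ∧
    (p.insert rb ra).size = p.size ∧
    (∀ z, RtP (p.insert rb ra) z = if RtP p z = rb then ra else RtP p z) := by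
  set p' := p.insert rb ra with hp'
  have hc : p.contains rb = true := by
    rw [PySem.Dict.contains_eq_decide_mem_keys]; simp [hrb]
  have hkeys : p'.keys = p.keys := PySem.Dict.keys_insert_of_contains p ra hc
  have hsize : p'.size = p.size := by
    simp [hp', PySem.Dict.size_insert, hc]
  have hsz1 : 1 ≤ p.size := by
    have h1 : p.keys ≠ [] := List.ne_nil_of_mem hrb
    have h2 : p.keys.length = p.size := by simp [PySem.Dict.keys, PySem.Dict.size]
    have := List.length_pos_of_ne_nil h1
    omega
  have hstep' : ∀ z, z ≠ rb → pstep p' z = pstep p z := by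
    intro z hz
    show p'.getD z z = p.getD z z
    rw [hp', PySem.Dict.getD_insert_of_ne _ _ _ hz]
  have hstepb : pstep p' rb = ra := by
    show p'.getD rb rb = ra
    rw [hp', PySem.Dict.getD_insert_self]
  have hrootpres : ∀ r, IsRootP p r → r ≠ rb → IsRootP p' r := by
    intro r hr hrrb
    unfold IsRootP
    rw [hstep' r hrrb]
    exact hr
  have hraR' : IsRootP p' ra := hrootpres ra hraR hne
  have base : ∀ z m, IsRootP p z → 1 ≤ m → iterP p' m z = if z = rb then ra else z := by
    intro z m hz hm
    by_cases hzrb : z = rb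
    · subst hzrb
      obtain ⟨m', rfl⟩ : ∃ m', m = m' + 1 := ⟨m - 1, by omega⟩
      simp only [iterP]
      rw [hstepb, iterP_root p' m' ra hraR']
      simp
    · rw [iterP_root p' m z (hrootpres z hz hzrb)]
      simp [hzrb]
  have hmr : ∀ k z m, IsRootP p (iterP p k z) → k < m →
      iterP p' m z = if iterP p k z = rb then ra else iterP p k z := by
    intro k
    induction k with
    | zero =>
      intro z m h hm
      exact base z m h (by omega)
    | succ k ih =>
      intro z m h hm
      by_cases hz : IsRootP p z
      · rw [iterP_root p _ z hz] at h ⊢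
        exact base z m h (by omega)
      · have hzrb : z ≠ rb := fun h' => hz (h' ▸ hrbR)
        obtain ⟨m', rfl⟩ : ∃ m', m = m' + 1 := ⟨m - 1, by omega⟩
        simp only [iterP]
        rw [hstep' z hzrb]
        exact ih (pstep p z) m' h (by omega)
  refine ⟨⟨?_, ?_, ?_⟩, hkeys, hsize, ?_⟩
  · rw [hkeys]; exact hwf.1
  · intro z hz
    rw [hkeys] at hz ⊢
    by_cases hzrb : z = rb
    · subst hzrb; rw [hstepb]; exact hra
    · rw [hstep' z hzrb]; exact hwf.2.1 z hz
  · intro z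
    obtain ⟨k, hk, hroot⟩ := reach_lt_size p hwf hsz1 z
    refine ⟨p.size, ?_⟩
    unfold IsRootP
    rw [hmr k z p.size hroot hk]
    split
    · rw [show pstep p' ra = ra from hraR']
    · next hne2 =>
      rw [show pstep p' (iterP p k z) = pstep p (iterP p k z) from hstep' _ hne2, hroot]
  · intro z
    unfold RtP
    rw [hsize]
    obtain ⟨k, hk, hroot⟩ := reach_lt_size p hwf hsz1 z
    rw [hmr k z p.size hroot hk,
        show iterP p p.size z = iterP p k z from iterP_absorb p k p.size z hroot (by omega)]

theorem RtP_pstep (p : PySem.Dict String String) (hwf : WFP p) (x : String) :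
    RtP p (pstep p x) = RtP p x := by
  by_cases hx0 : IsRootP p x
  · rw [show pstep p x = x from hx0]
  · obtain ⟨k, hk, hroot⟩ := reach_le_size p hwf x
    have hk1 : 1 ≤ k := by
      by_contra h
      have hk0 : k = 0 := by omega
      rw [hk0] at hroot
      exact hx0 hroot
    obtain ⟨j, rfl⟩ : ∃ j, k = j + 1 := ⟨k - 1, by omega⟩
    have hroot' : IsRootP p (iterP p j (pstep p x)) := hroot
    rw [RtP_eq_of_reach p j (pstep p x) hroot' (by omega),
        RtP_eq_of_reach p (j+1) x hroot (by omega)]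
    rfl

theorem mem_addK_self (ks : List String) (x : String) : x ∈ addK ks x := by
  unfold addK; split <;> simp [*]

theorem mem_addK (ks : List String) (x y : String) (h : y ∈ ks) : y ∈ addK ks x := by
  unfold addK; split <;> simp [h]

theorem WFP_empty : WFP (PySem.Dict.empty : PySem.Dict String String) := by
  refine ⟨?_, ?_, ?_⟩
  · simp [PySem.Dict.keys_empty]
  · intro x hxx; simp [PySem.Dict.keys_empty] at hxx
  · intro z
    refine ⟨0, ?_⟩
    show (PySem.Dict.empty : PySem.Dict String String).getD z z = z
    rw [PySem.Dict.getD_empty]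

-- ---- find ----
theorem findLoopA_spec (fuel : Nat) (p : PySem.Dict String String) (x : String) (k : Nat)
    (hwf : WFP p) (hx : x ∈ p.keys) (hk : IsRootP p (iterP p k x)) (hfuel : k < fuel) :
    (findLoopA fuel p x).1 = RtP p x ∧ WFP (findLoopA fuel p x).2 ∧
    (findLoopA fuel p x).2.keys = p.keys ∧ (findLoopA fuel p x).2.size = p.size ∧
    (∀ z, RtP (findLoopA fuel p x).2 z = RtP p z) := by
  induction fuel generalizing p x k with
  | zero => omega
  | succ fuel ih =>
    by_cases hr : pstep p x = x
    · have heq : findLoopA (fuel+1) p x = (x, p) := by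
        simp [findLoopA, pstep] at hr ⊢
        simp [hr]
      rw [heq]
      have hRt : RtP p x = x := by
        rw [RtP_eq_of_reach p 0 x hr (by omega)]; rfl
      exact ⟨hRt.symm, hwf, rfl, rfl, fun z => rfl⟩
    · have hgx_keys : pstep p (pstep p x) ∈ p.keys := hwf.2.1 _ (hwf.2.1 _ hx)
      obtain ⟨hwf', hkeys', hsize', hRt', hreach', hrootpres'⟩ := comp_spec p hwf x hx hr
      have hstep_eq : findLoopA (fuel+1) p x
          = findLoopA fuel (p.insert x (pstep p (pstep p x))) (pstep p (pstep p x)) := by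
        simp only [findLoopA]
        rw [if_neg (by exact hr)]
        rfl
      have hkpos : k ≠ 0 := by
        intro h; rw [h] at hk; exact hr hk
      obtain ⟨k', hroot', hk'⟩ :
          ∃ k', IsRootP p (iterP p k' (pstep p (pstep p x))) ∧ k' < fuel := by
        rcases Nat.lt_or_ge k 2 with h2 | h2
        · have hk1 : k = 1 := by omega
          rw [hk1] at hk hfuel
          have hpx : IsRootP p (pstep p x) := hk
          refine ⟨0, ?_, by omega⟩
          show IsRootP p (pstep p (pstep p x))
          rw [show pstep p (pstep p x) = pstep p x from hpx]
          exact hpx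
        · refine ⟨k - 2, ?_, by omega⟩
          have hcalc : iterP p (k-2) (pstep p (pstep p x)) = iterP p k x := by
            have h1 : iterP p ((k-2) + 2) x = iterP p (k-2) (iterP p 2 x) := iterP_add p (k-2) 2 x
            have h2 : iterP p 2 x = pstep p (pstep p x) := rfl
            rw [h2] at h1
            rw [← h1, show k - 2 + 2 = k by omega]
          rw [hcalc]
          exact hk
      have hroot'' : IsRootP (p.insert x (pstep p (pstep p x))) (iterP (p.insert x (pstep p (pstep p x))) k' (pstep p (pstep p x))) := by
        rw [hreach' k' _ hroot']
        exact hrootpres' _ hroot'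
      have hgx'' : pstep p (pstep p x) ∈ (p.insert x (pstep p (pstep p x))).keys := by
        rw [hkeys']; exact hgx_keys
      obtain ⟨ih1, ih2, ih3, ih4, ih5⟩ := ih _ _ k' hwf' hgx'' hroot'' hk'
      rw [hstep_eq]
      refine ⟨?_, ih2, by rw [ih3, hkeys'], by rw [ih4, hsize'], fun z => by rw [ih5 z, hRt' z]⟩
      rw [ih1, hRt' _, RtP_pstep p hwf, RtP_pstep p hwf]

theorem findA_spec (p : PySem.Dict String String) (x : String) (hwf : WFP p) :
    (findA p x).1 = RtP p x ∧ WFP (findA p x).2 ∧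
    (findA p x).2.keys = addK p.keys x ∧
    (∀ z, RtP (findA p x).2 z = RtP p z) := by
  by_cases hx : x ∈ p.keys
  · have hc : p.contains x = true := by
      rw [PySem.Dict.contains_eq_decide_mem_keys]; simp [hx]
    have hfa : findA p x = findLoopA p.size p x := by
      simp [findA, PySem.Dict.setdefault_of_contains p x hc]
    obtain ⟨k, hk, hroot⟩ := root_reach_lt_size p hwf x hx
    obtain ⟨h1, h2, h3, _, h5⟩ := findLoopA_spec p.size p x k hwf hx hroot hk
    rw [hfa]
    exact ⟨h1, h2, by rw [h3, addK, if_pos hx], h5⟩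
  · have hc : p.contains x = false := by
      rw [PySem.Dict.contains_eq_decide_mem_keys]; simp [hx]
    have hfa : findA p x = findLoopA (p.insert x x).size (p.insert x x) x := by
      simp [findA, PySem.Dict.setdefault_of_not_contains p x hc]
    obtain ⟨hwf1, hkeys1, hsize1, hRt1⟩ := fresh_spec p hwf x hx
    have hx1 : x ∈ (p.insert x x).keys := by rw [hkeys1]; simp
    have hroot1 : IsRootP (p.insert x x) x := by
      show (p.insert x x).getD x x = x
      rw [PySem.Dict.getD_insert_self]
    obtain ⟨h1, h2, h3, _, h5⟩ :=
      findLoopA_spec (p.insert x x).size (p.insert x x) x 0 hwf1 hx1 hroot1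
        (by rw [hsize1]; omega)
    rw [hfa]
    refine ⟨?_, h2, ?_, fun z => by rw [h5 z, hRt1 z]⟩
    · rw [h1, hRt1 x]
    · rw [h3, hkeys1, addK, if_neg hx]

-- ---- union ----
theorem unionA_spec (p : PySem.Dict String String) (a b : String) (hwf : WFP p) :
    WFP (unionA p a b) ∧ (unionA p a b).keys = addK (addK p.keys a) b ∧
    (∀ z, RtP (unionA p a b) z = mergeρ (RtP p) a b z) := by
  obtain ⟨h1a, h1wf, h1keys, h1rt⟩ := findA_spec p a hwf
  obtain ⟨h2b, h2wf, h2keys, h2rt⟩ := findA_spec (findA p a).2 b h1wf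
  have hkeys2 : (findA (findA p a).2 b).2.keys = addK (addK p.keys a) b := by
    rw [h2keys, h1keys]
  have hrb : (findA (findA p a).2 b).1 = RtP p b := by rw [h2b, h1rt b]
  have hrt2 : ∀ z, RtP (findA (findA p a).2 b).2 z = RtP p z := fun z => by
    rw [h2rt z, h1rt z]
  have hmemA : a ∈ (findA (findA p a).2 b).2.keys := by
    rw [hkeys2]; exact mem_addK _ _ _ (mem_addK_self _ _)
  have hmemB : b ∈ (findA (findA p a).2 b).2.keys := by
    rw [hkeys2]; exact mem_addK_self _ _
  by_cases heq : RtP p a = RtP p b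
  · have hif : unionA p a b = (findA (findA p a).2 b).2 := by
      simp only [unionA]
      rw [h1a, hrb, if_neg (by simp [heq])]
    rw [hif]
    refine ⟨h2wf, hkeys2, fun z => ?_⟩
    rw [hrt2 z, mergeρ, if_pos heq]
  · have hif : unionA p a b = (findA (findA p a).2 b).2.insert (RtP p b) (RtP p a) := by
      simp only [unionA]
      rw [h1a, hrb, if_pos heq]
    have hraK : RtP p a ∈ (findA (findA p a).2 b).2.keys := by
      have h := RtP_mem_keys _ h2wf a hmemA
      rw [hrt2 a] at h; exact h
    have hrbK : RtP p b ∈ (findA (findA p a).2 b).2.keys := by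
      have h := RtP_mem_keys _ h2wf b hmemB
      rw [hrt2 b] at h; exact h
    have hraR : IsRootP (findA (findA p a).2 b).2 (RtP p a) := by
      have h := RtP_root _ h2wf a
      rw [hrt2 a] at h; exact h
    have hrbR : IsRootP (findA (findA p a).2 b).2 (RtP p b) := by
      have h := RtP_root _ h2wf b
      rw [hrt2 b] at h; exact h
    obtain ⟨mwf, mkeys, _, mrt⟩ :=
      merge_spec _ h2wf (RtP p a) (RtP p b) hraK hrbK hraR hrbR heq
    rw [hif]
    refine ⟨mwf, by rw [mkeys, hkeys2], fun z => ?_⟩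
    rw [mrt z, hrt2 z, mergeρ, if_neg heq]


-- ---- generic helpers for the B-side correspondence ----
theorem bool_eq_false {b : Bool} (h : ¬ b = true) : b = false := by
  cases b
  · rfl
  · exact absurd rfl h

theorem contains_true_iff (c : List String) (a : String) : c.contains a = true ↔ a ∈ c := by
  simp

theorem forall₂_split {R : List String → List String → Prop} (y1 y2 : List (List String)) :
    ∀ xs, List.Forall₂ R xs (y1 ++ y2) →
      ∃ x1 x2, xs = x1 ++ x2 ∧ List.Forall₂ R x1 y1 ∧ List.Forall₂ R x2 y2 := by
  induction y1 with
  | nil => intro xs h; exact ⟨[], xs, rfl, List.Forall₂.nil, h⟩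
  | cons b y1 ih =>
    intro xs h
    cases h with
    | cons hab h' =>
      obtain ⟨x1, x2, rfl, h1, h2⟩ := ih _ h'
      exact ⟨_ :: x1, x2, rfl, List.Forall₂.cons hab h1, h2⟩

theorem forall₂_split_cons {R : List String → List String → Prop} (y : List String)
    (ys : List (List String)) (xs : List (List String))
    (h : List.Forall₂ R xs (y :: ys)) :
    ∃ x xs', xs = x :: xs' ∧ R x y ∧ List.Forall₂ R xs' ys := by
  cases h with
  | cons hab h' => exact ⟨_, _, rfl, hab, h'⟩

theorem forall₂_append {R : List String → List String → Prop}
    {a c : List (List String)} {b d : List (List String)}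
    (h1 : List.Forall₂ R a b) (h2 : List.Forall₂ R c d) :
    List.Forall₂ R (a ++ c) (b ++ d) := by
  induction h1 with
  | nil => simpa using h2
  | cons hab h ih => exact List.Forall₂.cons hab ih

theorem forall₂_mem_left {R : List String → List String → Prop}
    {xs ys : List (List String)} (h : List.Forall₂ R xs ys) :
    ∀ x ∈ xs, ∃ y ∈ ys, R x y := by
  induction h with
  | nil => intro x hx; simp at hx
  | cons hab h ih =>
    intro x hx
    rcases List.mem_cons.1 hx with rfl | hx'
    · exact ⟨_, by simp, hab⟩
    · obtain ⟨y, hy, hr⟩ := ih x hx'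
      exact ⟨y, by simp [hy], hr⟩

theorem forall₂_mem_right {R : List String → List String → Prop}
    {xs ys : List (List String)} (h : List.Forall₂ R xs ys) :
    ∀ y ∈ ys, ∃ x ∈ xs, R x y := by
  induction h with
  | nil => intro y hy; simp at hy
  | cons hab h ih =>
    intro y hy
    rcases List.mem_cons.1 hy with rfl | hy'
    · exact ⟨_, by simp, hab⟩
    · obtain ⟨x, hx, hr⟩ := ih y hy'
      exact ⟨x, by simp [hx], hr⟩

theorem findIdx?_congr {α : Type} (l : List α) (p q : α → Bool)
    (h : ∀ c ∈ l, p c = q c) : l.findIdx? p = l.findIdx? q := by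
  induction l with
  | nil => rfl
  | cons c l ih =>
    simp only [List.findIdx?_cons]
    rw [h c (by simp), ih (fun d hd => h d (by simp [hd]))]

theorem findIdx?_none_of_all {α : Type} (l : List α) (p : α → Bool)
    (h : ∀ c ∈ l, p c = false) : l.findIdx? p = none := by
  induction l with
  | nil => rfl
  | cons c l ih =>
    simp only [List.findIdx?_cons, h c (by simp)]
    simp [ih (fun d hd => h d (by simp [hd]))]

theorem findIdx?_prefix_hit {α : Type} (l1 : List α) (c : α) (l2 : List α) (p : α → Bool)
    (h1 : ∀ d ∈ l1, p d = false) (h2 : p c = true) :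
    (l1 ++ c :: l2).findIdx? p = some l1.length := by
  induction l1 with
  | nil => simp [List.findIdx?_cons, h2]
  | cons d l1 ih =>
    simp only [List.cons_append, List.findIdx?_cons, h1 d (by simp)]
    simp [ih (fun e he => h1 e (by simp [he]))]

theorem findIdx?_append_some {α : Type} (l e : List α) (p : α → Bool) :
    ∀ i, l.findIdx? p = some i → (l ++ e).findIdx? p = some i := by
  induction l with
  | nil => intro i h; simp at h
  | cons c l ih =>
    intro i h
    rw [List.cons_append]
    simp only [List.findIdx?_cons] at h ⊢
    by_cases hc : p c = true
    · rw [if_pos hc] at h; rw [if_pos hc]; exact h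
    · rw [if_neg hc] at h; rw [if_neg hc]
      rcases hl : l.findIdx? p with _ | j
      · rw [hl] at h; simp at h
      · rw [hl] at h
        simp only [Option.map_some] at h
        rw [ih j hl]
        simpa using h

theorem findIdx?_isSome_of_exists {α : Type} (l : List α) (p : α → Bool)
    (h : ∃ c ∈ l, p c = true) : ∃ i, l.findIdx? p = some i := by
  induction l with
  | nil => simp at h
  | cons c l ih =>
    by_cases hc : p c = true
    · exact ⟨0, by simp [List.findIdx?_cons, hc]⟩
    · obtain ⟨d, hd, hpd⟩ := h
      rcases List.mem_cons.1 hd with rfl | hd'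
      · exact absurd hpd hc
      · obtain ⟨i, hi⟩ := ih ⟨d, hd', hpd⟩
        exact ⟨i + 1, by simp [List.findIdx?_cons, hc, hi]⟩

theorem getD_at_length (l1 : List (List String)) (c : List String) (l2 : List (List String)) :
    (l1 ++ c :: l2).getD l1.length [] = c := by
  induction l1 with
  | nil => rfl
  | cons d l1 ih => simp only [List.cons_append, List.length_cons, List.getD_cons_succ]; exact ih

theorem set_at_length (l1 : List (List String)) (c y : List String) (l2 : List (List String)) :
    (l1 ++ c :: l2).set l1.length y = l1 ++ y :: l2 := by
  induction l1 with
  | nil => rfl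
  | cons d l1 ih => simp [ih]

theorem eraseIdx_at_length (l1 : List (List String)) (c : List String) (l2 : List (List String)) :
    (l1 ++ c :: l2).eraseIdx l1.length = l1 ++ l2 := by
  induction l1 with
  | nil => rfl
  | cons d l1 ih => simp [ih]

theorem filter_or_perm (l : List String) (p q : String → Bool)
    (h : ∀ z ∈ l, ¬(p z = true ∧ q z = true)) :
    (l.filter (fun z => p z || q z)).Perm (l.filter p ++ l.filter q) := by
  induction l with
  | nil => simp
  | cons z l ih =>
    have ih' := ih (fun y hy => h y (by simp [hy]))
    by_cases hp : p z = true
    · have hq : ¬ q z = true := fun hq => h z (by simp) ⟨hp, hq⟩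
      simp only [List.filter_cons, hp, bool_eq_false hq, Bool.true_or]
      simpa using List.Perm.cons z ih'
    · by_cases hq : q z = true
      · simp only [List.filter_cons, bool_eq_false hp, hq, Bool.false_or]
        simp only [Bool.false_eq_true, if_false]
        exact (List.Perm.cons z ih').trans List.perm_middle.symm
      · simp only [List.filter_cons, bool_eq_false hp, bool_eq_false hq, Bool.false_or]
        simpa using ih'

theorem dedup_append_singleton (ys : List String) (y : String) :
    PySem.List.dedup (ys ++ [y])
      = if y ∈ ys then PySem.List.dedup ys else PySem.List.dedup ys ++ [y] := by
  rw [PySem.List.dedup_eq_ofList, PySem.List.dedup_eq_ofList,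
      PySem.Set.ofList_eq_foldl, PySem.Set.ofList_eq_foldl, List.foldl_append]
  simp only [List.foldl_cons, List.foldl_nil]
  rw [← PySem.Set.ofList_eq_foldl]
  by_cases hy : y ∈ ys
  · rw [if_pos hy]
    simp [PySem.Set.add, PySem.Set.contains, (PySem.Set.mem_ofList ys y).2 hy]
  · rw [if_neg hy]
    have : y ∉ PySem.Set.ofList ys := fun h => hy ((PySem.Set.mem_ofList ys y).1 h)
    simp [PySem.Set.add, PySem.Set.contains, this]

theorem dedup_map_dedup (l : List String) (σ : String → String) :
    PySem.List.dedup (l.map σ) = PySem.List.dedup ((PySem.List.dedup l).map σ) := by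
  induction l using List.reverseRecOn with
  | nil => rfl
  | append_singleton l x ih =>
    rw [List.map_append]
    simp only [List.map_cons, List.map_nil]
    rw [dedup_append_singleton, dedup_append_singleton l x]
    by_cases hx : x ∈ l
    · rw [if_pos (List.mem_map_of_mem hx), if_pos hx]
      exact ih
    · rw [if_neg hx, List.map_append]
      simp only [List.map_cons, List.map_nil]
      rw [dedup_append_singleton]
      by_cases hσ : σ x ∈ l.map σ
      · rw [if_pos hσ]
        have hmem : σ x ∈ (PySem.List.dedup l).map σ := by
          obtain ⟨z, hz, he⟩ := List.mem_map.1 hσ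
          exact List.mem_map.2 ⟨z, by
            rw [PySem.List.dedup_eq_ofList]
            exact (PySem.Set.mem_ofList _ _).2 hz, he⟩
        rw [if_pos hmem]
        exact ih
      · rw [if_neg hσ]
        have hmem : σ x ∉ (PySem.List.dedup l).map σ := by
          intro hmem
          obtain ⟨z, hz, he⟩ := List.mem_map.1 hmem
          refine hσ (List.mem_map.2 ⟨z, ?_, he⟩)
          rw [PySem.List.dedup_eq_ofList] at hz
          exact (PySem.Set.mem_ofList _ _).1 hz
        rw [if_neg hmem, ih]

theorem foldl_add_disjoint : ∀ (w s : List String), (s ++ w).Nodup →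
    List.foldl PySem.Set.add s w = s ++ w := by
  intro w
  induction w with
  | nil => intro s _; simp
  | cons t w ih =>
    intro s h
    have hts : t ∉ s := by
      obtain ⟨_, _, hdisj⟩ := List.nodup_append.1 h
      exact fun hts => hdisj t hts t (by simp) rfl
    have hadd : PySem.Set.add s t = s ++ [t] := by
      simp [PySem.Set.add, PySem.Set.contains, hts]
    simp only [List.foldl_cons]
    rw [hadd]
    have hnd : ((s ++ [t]) ++ w).Nodup := by
      rw [List.append_assoc]
      exact h
    rw [ih (s ++ [t]) hnd, List.append_assoc]
    rfl

theorem dedup_single_dup (s w : List String) (y : String) (hy : y ∈ s)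
    (hnd : (s ++ w).Nodup) : PySem.List.dedup (s ++ y :: w) = s ++ w := by
  rw [PySem.List.dedup_eq_ofList, PySem.Set.ofList_eq_foldl, List.foldl_append]
  have hs : List.foldl PySem.Set.add [] s = s := by
    rw [← PySem.Set.ofList_eq_foldl]
    exact PySem.Set.ofList_eq_self_of_nodup _ (List.nodup_append.1 hnd).1
  rw [hs]
  simp only [List.foldl_cons]
  have hadd : PySem.Set.add s y = s := by
    simp [PySem.Set.add, PySem.Set.contains, hy]
  rw [hadd]
  exact foldl_add_disjoint w s hnd

theorem two_mem_split (l : List String) (x y : String) (hxy : x ≠ y)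
    (hx : x ∈ l) (hy : y ∈ l) :
    ∃ u c1 v c2 w, l = u ++ c1 :: v ++ c2 :: w ∧
      ((c1 = x ∧ c2 = y) ∨ (c1 = y ∧ c2 = x)) := by
  induction l with
  | nil => simp at hx
  | cons h l ih =>
    by_cases hhx : h = x
    · have hyl : y ∈ l := by
        rcases List.mem_cons.1 hy with h1 | h1
        · exfalso; rw [hhx] at h1; exact hxy h1.symm
        · exact h1
      obtain ⟨v, w, hvw⟩ := List.append_of_mem hyl
      exact ⟨[], h, v, y, w, by simp [hvw], Or.inl ⟨hhx, rfl⟩⟩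
    · by_cases hhy : h = y
      · have hxl : x ∈ l := by
          rcases List.mem_cons.1 hx with h1 | h1
          · exact absurd h1.symm hhx
          · exact h1
        obtain ⟨v, w, hvw⟩ := List.append_of_mem hxl
        exact ⟨[], h, v, x, w, by simp [hvw], Or.inr ⟨hhy, rfl⟩⟩
      · have hxl : x ∈ l := (List.mem_cons.1 hx).resolve_left (fun h1 => hhx h1.symm)
        have hyl : y ∈ l := (List.mem_cons.1 hy).resolve_left (fun h1 => hhy h1.symm)
        obtain ⟨u, c1, v, c2, w, hl, hc⟩ := ih hxl hyl
        exact ⟨h :: u, c1, v, c2, w, by simp [hl], hc⟩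

theorem nodup_shape (u : List String) (c1 : String) (v : List String) (c2 : String)
    (w : List String) (h : ((u ++ c1 :: v) ++ c2 :: w).Nodup) :
    c1 ∉ u ∧ c1 ∉ v ∧ c1 ∉ w ∧ c2 ∉ u ∧ c2 ∉ v ∧ c2 ∉ w ∧ c1 ≠ c2 ∧
    ((u ++ c1 :: v) ++ w).Nodup ∧
    u.Nodup ∧ v.Nodup ∧ w.Nodup ∧
    (∀ a ∈ u, ∀ b ∈ v, a ≠ b) ∧ (∀ a ∈ u, ∀ b ∈ w, a ≠ b) ∧
    (∀ a ∈ v, ∀ b ∈ w, a ≠ b) := by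
  obtain ⟨huv, h2, hdisj⟩ := List.nodup_append.1 h
  obtain ⟨hu, hc1v', hdisju⟩ := List.nodup_append.1 huv
  obtain ⟨hc1v, hv⟩ := List.nodup_cons.1 hc1v'
  obtain ⟨hc2w, hw⟩ := List.nodup_cons.1 h2
  refine ⟨fun hm => hdisju c1 hm c1 (by simp) rfl, hc1v,
    fun hm => hdisj c1 (by simp) c1 (by simp [hm]) rfl,
    fun hm => hdisj c2 (by simp [hm]) c2 (by simp) rfl,
    fun hm => hdisj c2 (by simp [hm]) c2 (by simp) rfl,
    hc2w, hdisj c1 (by simp) c2 (by simp), ?_, hu, hv, hw,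
    fun a ha b hb => hdisju a ha b (by simp [hb]),
    fun a ha b hb => hdisj a (by simp [ha]) b (by simp [hb]),
    fun a ha b hb => hdisj a (by simp [ha]) b (by simp [hb])⟩
  exact List.nodup_append.2 ⟨huv, hw, fun a ha b hb => hdisj a ha b (by simp [hb])⟩

theorem contains_of_perm_filter (ks2 : List String) (ρ : String → String) (x r : String)
    (c : List String) (hx : x ∈ ks2)
    (hc : c.Perm (ks2.filter (fun z => decide (ρ z = r)))) :
    (c.contains x = true) ↔ ρ x = r := by
  rw [contains_true_iff, hc.mem_iff, List.mem_filter]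
  simp [hx]

theorem canonV_congr (ks : List String) (ρ1 ρ2 : String → String)
    (h : ∀ z, ρ1 z = ρ2 z) : canonV ks ρ1 = canonV ks ρ2 := by
  have he : ρ1 = ρ2 := funext h
  rw [he]

theorem canonV_fresh (ks : List String) (ρ : String → String) (a : String)
    (hρ : ∀ x, x ∉ ks → ρ x = x) (hcl : ∀ x ∈ ks, ρ x ∈ ks) (ha : a ∉ ks) :
    canonV (ks ++ [a]) ρ = canonV ks ρ ++ [[a]] := by
  unfold canonV
  rw [List.map_append]
  simp only [List.map_cons, List.map_nil]
  have hρa : ρ a = a := hρ a ha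
  have hmem : ρ a ∉ ks.map ρ := by
    rw [hρa]
    intro h
    obtain ⟨z, hz, he⟩ := List.mem_map.1 h
    exact ha (he ▸ hcl z hz)
  rw [dedup_append_singleton, if_neg hmem, List.map_append]
  congr 1
  · refine List.map_congr_left ?_
    intro r hr
    have hrks : r ∈ ks := by
      rw [PySem.List.dedup_eq_ofList] at hr
      obtain ⟨z, hz, he⟩ := List.mem_map.1 ((PySem.Set.mem_ofList _ _).1 hr)
      exact he ▸ hcl z hz
    have hne : ¬ (ρ a = r) := by
      rw [hρa]
      exact fun h => ha (h ▸ hrks)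
    simp [List.filter_append, hne]
  · simp only [List.map_cons, List.map_nil]
    congr 1
    rw [List.filter_append]
    have h1 : ks.filter (fun x => decide (ρ x = ρ a)) = [] := by
      rw [List.filter_eq_nil_iff]
      intro z hz
      simp only [decide_eq_true_eq]
      rw [hρa]
      exact fun h => ha (h ▸ hcl z hz)
    rw [h1]
    simp

theorem merge_tail (ks2 : List String) (ρ : String → String) (a b c1 c2 : String)
    (u v w : List String) (cu cv cw : List (List String)) (x1 x2 : List String)
    (hne : ρ a ≠ ρ b)
    (hroots : PySem.List.dedup (ks2.map ρ) = u ++ c1 :: v ++ c2 :: w)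
    (hc : (c1 = ρ a ∧ c2 = ρ b) ∨ (c1 = ρ b ∧ c2 = ρ a))
    (hcu : List.Forall₂ (fun c v => c.Perm v) cu
      (u.map (fun r => ks2.filter (fun x => decide (ρ x = r)))))
    (hx1 : x1.Perm (ks2.filter (fun x => decide (ρ x = c1))))
    (hcv : List.Forall₂ (fun c v => c.Perm v) cv
      (v.map (fun r => ks2.filter (fun x => decide (ρ x = r)))))
    (hx2 : x2.Perm (ks2.filter (fun x => decide (ρ x = c2))))
    (hcw : List.Forall₂ (fun c v => c.Perm v) cw
      (w.map (fun r => ks2.filter (fun x => decide (ρ x = r))))) :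
    List.Forall₂ (fun c v => c.Perm v) (cu ++ (x1 ++ x2) :: (cv ++ cw))
      (canonV ks2 (mergeρ ρ a b)) := by
  have hndroots : (u ++ c1 :: v ++ c2 :: w).Nodup := by
    rw [← hroots, PySem.List.dedup_eq_ofList]
    exact PySem.Set.nodup_ofList _
  obtain ⟨hc1u, hc1v, hc1w, hc2u, hc2v, hc2w, hc12, hndm, hu, hv, hw, huvd, huwd, hvwd⟩ :=
    nodup_shape u c1 v c2 w hndroots
  have huvw : ∀ r, r ∈ u ∨ r ∈ v ∨ r ∈ w → r ≠ ρ a ∧ r ≠ ρ b := by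
    intro r hr
    have h1 : r ≠ c1 := by
      rcases hr with h | h | h
      · exact fun e => hc1u (e ▸ h)
      · exact fun e => hc1v (e ▸ h)
      · exact fun e => hc1w (e ▸ h)
    have h2 : r ≠ c2 := by
      rcases hr with h | h | h
      · exact fun e => hc2u (e ▸ h)
      · exact fun e => hc2v (e ▸ h)
      · exact fun e => hc2w (e ▸ h)
    rcases hc with ⟨e1, e2⟩ | ⟨e1, e2⟩
    · exact ⟨e1 ▸ h1, e2 ▸ h2⟩
    · exact ⟨e2 ▸ h2, e1 ▸ h1⟩
  have hmapρ' : ks2.map (mergeρ ρ a b) = (ks2.map ρ).map (fun r => if r = ρ b then ρ a else r) := by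
    rw [List.map_map]
    refine List.map_congr_left ?_
    intro z _
    show mergeρ ρ a b z = if ρ z = ρ b then ρ a else ρ z
    unfold mergeρ
    rw [if_neg hne]
  have hσu : u.map (fun r => if r = ρ b then ρ a else r) = u := by
    have h := List.map_congr_left (l := u)
      (f := fun r => if r = ρ b then ρ a else r) (g := fun r => r)
      (fun r hr => if_neg (huvw r (Or.inl hr)).2)
    rw [h, List.map_id']
  have hσv : v.map (fun r => if r = ρ b then ρ a else r) = v := by
    have h := List.map_congr_left (l := v)
      (f := fun r => if r = ρ b then ρ a else r) (g := fun r => r)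
      (fun r hr => if_neg (huvw r (Or.inr (Or.inl hr))).2)
    rw [h, List.map_id']
  have hσw : w.map (fun r => if r = ρ b then ρ a else r) = w := by
    have h := List.map_congr_left (l := w)
      (f := fun r => if r = ρ b then ρ a else r) (g := fun r => r)
      (fun r hr => if_neg (huvw r (Or.inr (Or.inr hr))).2)
    rw [h, List.map_id']
  have hσ1 : (if c1 = ρ b then ρ a else c1) = ρ a := by
    rcases hc with ⟨e1, _⟩ | ⟨e1, _⟩
    · rw [e1, if_neg hne]
    · rw [e1, if_pos rfl]
  have hσ2 : (if c2 = ρ b then ρ a else c2) = ρ a := by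
    rcases hc with ⟨_, e2⟩ | ⟨_, e2⟩
    · rw [e2, if_pos rfl]
    · rw [e2, if_neg hne]
  have hroots' : PySem.List.dedup (ks2.map (mergeρ ρ a b)) = (u ++ ρ a :: v) ++ w := by
    rw [hmapρ', dedup_map_dedup, hroots]
    rw [List.map_append, List.map_append, List.map_cons, List.map_cons,
        hσu, hσv, hσw, hσ1, hσ2]
    refine dedup_single_dup _ _ _ (by simp) ?_
    rcases hc with ⟨e1, _⟩ | ⟨_, e2⟩
    · rw [← e1]; exact hndm
    · rw [← e2]
      refine List.nodup_append.2 ⟨List.nodup_append.2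
        ⟨hu, List.nodup_cons.2 ⟨hc2v, hv⟩, ?_⟩, hw, ?_⟩
      · intro x hx y hy
        rcases List.mem_cons.1 hy with rfl | hyv
        · exact fun e => hc2u (e ▸ hx)
        · exact huvd x hx y hyv
      · intro x hx y hy
        rcases List.mem_append.1 hx with hxu | hxc
        · exact huwd x hxu y hy
        · rcases List.mem_cons.1 hxc with rfl | hxv
          · exact fun e => hc2w (e.symm ▸ hy)
          · exact hvwd x hxv y hy
  have hF'eq : ∀ r, r ≠ ρ a → r ≠ ρ b →
      ks2.filter (fun x => decide (mergeρ ρ a b x = r))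
        = ks2.filter (fun x => decide (ρ x = r)) := by
    intro r h1 h2
    refine List.filter_congr ?_
    intro z _
    show decide (mergeρ ρ a b z = r) = decide (ρ z = r)
    unfold mergeρ
    rw [if_neg hne]
    by_cases hz : ρ z = ρ b
    · rw [if_pos hz]
      have e1 : ¬ (ρ a = r) := fun e => h1 e.symm
      have e2 : ¬ (ρ z = r) := by
        rw [hz]
        exact fun e => h2 e.symm
      rw [decide_eq_false e1, decide_eq_false e2]
    · rw [if_neg hz]
  have hF'ra : (ks2.filter (fun x => decide (mergeρ ρ a b x = ρ a))).Perm
      (ks2.filter (fun x => decide (ρ x = ρ a)) ++ ks2.filter (fun x => decide (ρ x = ρ b))) := by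
    have heq : ks2.filter (fun x => decide (mergeρ ρ a b x = ρ a))
        = ks2.filter (fun x => decide (ρ x = ρ a) || decide (ρ x = ρ b)) := by
      refine List.filter_congr ?_
      intro z _
      show decide (mergeρ ρ a b z = ρ a) = _
      unfold mergeρ
      rw [if_neg hne]
      by_cases hz : ρ z = ρ b
      · rw [if_pos hz]
        simp [hz]
      · rw [if_neg hz]
        simp [hz]
    rw [heq]
    refine filter_or_perm ks2 _ _ ?_
    rintro z _ ⟨h1, h2⟩
    simp only [decide_eq_true_eq] at h1 h2
    exact hne (by rw [← h1, h2])
  unfold canonV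
  rw [hroots', List.map_append, List.map_append, List.map_cons]
  have hcshape : cu ++ (x1 ++ x2) :: (cv ++ cw) = (cu ++ (x1 ++ x2) :: cv) ++ cw := by
    simp
  rw [hcshape]
  have hmapu' : u.map (fun r => ks2.filter (fun x => decide (mergeρ ρ a b x = r)))
      = u.map (fun r => ks2.filter (fun x => decide (ρ x = r))) :=
    List.map_congr_left (fun r hr => hF'eq r (huvw r (Or.inl hr)).1 (huvw r (Or.inl hr)).2)
  have hmapv' : v.map (fun r => ks2.filter (fun x => decide (mergeρ ρ a b x = r)))
      = v.map (fun r => ks2.filter (fun x => decide (ρ x = r))) :=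
    List.map_congr_left (fun r hr => hF'eq r (huvw r (Or.inr (Or.inl hr))).1
      (huvw r (Or.inr (Or.inl hr))).2)
  have hmapw' : w.map (fun r => ks2.filter (fun x => decide (mergeρ ρ a b x = r)))
      = w.map (fun r => ks2.filter (fun x => decide (ρ x = r))) :=
    List.map_congr_left (fun r hr => hF'eq r (huvw r (Or.inr (Or.inr hr))).1
      (huvw r (Or.inr (Or.inr hr))).2)
  rw [hmapu', hmapv', hmapw']
  refine forall₂_append (forall₂_append hcu (List.Forall₂.cons ?_ hcv)) hcw
  rcases hc with ⟨e1, e2⟩ | ⟨e1, e2⟩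
  · rw [e1] at hx1
    rw [e2] at hx2
    exact (hx1.append hx2).trans hF'ra.symm
  · rw [e1] at hx1
    rw [e2] at hx2
    exact ((hx1.append hx2).trans List.perm_append_comm).trans hF'ra.symm

theorem merge_core (ks2 : List String) (ρ : String → String) (a b : String)
    (ha : a ∈ ks2) (hb : b ∈ ks2) (hne : ρ a ≠ ρ b)
    (comps2 : List (List String))
    (hsim : List.Forall₂ (fun c v => c.Perm v) comps2 (canonV ks2 ρ))
    (ia ib : Nat)
    (hia : comps2.findIdx? (fun c => c.contains a) = some ia)
    (hib : comps2.findIdx? (fun c => c.contains b) = some ib) :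
    ia ≠ ib ∧
    List.Forall₂ (fun c v => c.Perm v)
      ((comps2.set (min ia ib) (comps2.getD (min ia ib) [] ++ comps2.getD (max ia ib) [])).eraseIdx
        (max ia ib))
      (canonV ks2 (mergeρ ρ a b)) := by
  have hraM : ρ a ∈ PySem.List.dedup (ks2.map ρ) := by
    rw [PySem.List.dedup_eq_ofList]
    exact (PySem.Set.mem_ofList _ _).2 (List.mem_map_of_mem ha)
  have hrbM : ρ b ∈ PySem.List.dedup (ks2.map ρ) := by
    rw [PySem.List.dedup_eq_ofList]
    exact (PySem.Set.mem_ofList _ _).2 (List.mem_map_of_mem hb)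
  obtain ⟨u, c1, v, c2, w, hroots, hc⟩ := two_mem_split _ _ _ hne hraM hrbM
  have hndroots : (u ++ c1 :: v ++ c2 :: w).Nodup := by
    rw [← hroots, PySem.List.dedup_eq_ofList]
    exact PySem.Set.nodup_ofList _
  obtain ⟨hc1u, hc1v, hc1w, hc2u, hc2v, hc2w, hc12, _, _, _, _, _, _, _⟩ :=
    nodup_shape u c1 v c2 w hndroots
  have hcanon : canonV ks2 ρ
      = u.map (fun r => ks2.filter (fun x => decide (ρ x = r)))
        ++ (ks2.filter (fun x => decide (ρ x = c1)))
        :: (v.map (fun r => ks2.filter (fun x => decide (ρ x = r)))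
        ++ (ks2.filter (fun x => decide (ρ x = c2)))
        :: w.map (fun r => ks2.filter (fun x => decide (ρ x = r)))) := by
    unfold canonV
    rw [hroots]
    simp
  rw [hcanon] at hsim
  obtain ⟨cu, rest1, rfl, hcu, hrest1⟩ := forall₂_split _ _ _ hsim
  obtain ⟨x1, rest2, rfl, hx1, hrest2⟩ := forall₂_split_cons _ _ _ hrest1
  obtain ⟨cv, rest3, rfl, hcv, hrest3⟩ := forall₂_split _ _ _ hrest2
  obtain ⟨x2, cw, rfl, hx2, hcw⟩ := forall₂_split_cons _ _ _ hrest3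
  have hfalse : ∀ (cl : List (List String)) (rl : List String),
      List.Forall₂ (fun c v => c.Perm v) cl
        (rl.map (fun r => ks2.filter (fun z => decide (ρ z = r)))) →
      ∀ s, s ∈ ks2 → ρ s ∉ rl → ∀ c ∈ cl, c.contains s = false := by
    intro cl rl hfa s hs hsrl c hccl
    obtain ⟨y, hy, hr⟩ := forall₂_mem_left hfa c hccl
    obtain ⟨r, hru, rfl⟩ := List.mem_map.1 hy
    refine bool_eq_false ?_
    rw [contains_of_perm_filter ks2 ρ s r c hs hr]
    exact fun e => hsrl (e ▸ hru)
  have htrue : ∀ (c : List String) (r : String),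
      c.Perm (ks2.filter (fun z => decide (ρ z = r))) →
      ∀ s, s ∈ ks2 → ρ s = r → c.contains s = true :=
    fun c r hp s hs he => (contains_of_perm_filter ks2 ρ s r c hs hp).2 he
  have hlen1 : (cu ++ x1 :: cv).length = cu.length + (1 + cv.length) := by
    simp
    omega
  rcases hc with ⟨e1, e2⟩ | ⟨e1, e2⟩
  · -- c1 = ρ a, c2 = ρ b
    have hia' : (cu ++ x1 :: (cv ++ x2 :: cw)).findIdx? (fun c => c.contains a)
        = some cu.length := by
      refine findIdx?_prefix_hit _ _ _ _ ?_ ?_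
      · exact hfalse cu u hcu a ha (fun hm => hc1u (e1 ▸ hm))
      · exact htrue x1 c1 hx1 a ha e1.symm
    have hib' : (cu ++ x1 :: (cv ++ x2 :: cw)).findIdx? (fun c => c.contains b)
        = some (cu.length + (1 + cv.length)) := by
      have hshape : cu ++ x1 :: (cv ++ x2 :: cw) = (cu ++ x1 :: cv) ++ x2 :: cw := by
        simp
      rw [hshape, ← hlen1]
      refine findIdx?_prefix_hit _ _ _ _ ?_ ?_
      · intro d hd
        rcases List.mem_append.1 hd with hdu | hdc
        · exact hfalse cu u hcu b hb (fun hm => hc2u (e2 ▸ hm)) d hdu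
        · rcases List.mem_cons.1 hdc with rfl | hdv
          · refine bool_eq_false ?_
            rw [contains_of_perm_filter ks2 ρ b c1 d hb hx1, e1]
            exact fun e => hne e.symm
          · exact hfalse cv v hcv b hb (fun hm => hc2v (e2 ▸ hm)) d hdv
      · exact htrue x2 c2 hx2 b hb e2.symm
    rw [hia'] at hia
    rw [hib'] at hib
    obtain rfl : cu.length = ia := Option.some.inj hia
    obtain rfl : cu.length + (1 + cv.length) = ib := Option.some.inj hib
    have hlt : cu.length < cu.length + (1 + cv.length) := by omega
    rw [Nat.min_eq_left (by omega), Nat.max_eq_right (by omega)]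
    refine ⟨by omega, ?_⟩
    have hg1 : (cu ++ x1 :: (cv ++ x2 :: cw)).getD cu.length [] = x1 :=
      getD_at_length _ _ _
    have hg2 : (cu ++ x1 :: (cv ++ x2 :: cw)).getD (cu.length + (1 + cv.length)) [] = x2 := by
      have hshape : cu ++ x1 :: (cv ++ x2 :: cw) = (cu ++ x1 :: cv) ++ x2 :: cw := by simp
      rw [hshape, ← hlen1]
      exact getD_at_length _ _ _
    rw [hg1, hg2, set_at_length]
    have hshape2 : cu ++ (x1 ++ x2) :: (cv ++ x2 :: cw)
        = (cu ++ (x1 ++ x2) :: cv) ++ x2 :: cw := by simp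
    have hlen2 : (cu ++ (x1 ++ x2) :: cv).length = cu.length + (1 + cv.length) := by
      simp
      omega
    rw [hshape2, ← hlen2, eraseIdx_at_length, List.append_assoc]
    exact merge_tail ks2 ρ a b c1 c2 u v w cu cv cw x1 x2 hne hroots
      (Or.inl ⟨e1, e2⟩) hcu hx1 hcv hx2 hcw
  · -- c1 = ρ b, c2 = ρ a
    have hib' : (cu ++ x1 :: (cv ++ x2 :: cw)).findIdx? (fun c => c.contains b)
        = some cu.length := by
      refine findIdx?_prefix_hit _ _ _ _ ?_ ?_
      · exact hfalse cu u hcu b hb (fun hm => hc1u (e1 ▸ hm))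
      · exact htrue x1 c1 hx1 b hb e1.symm
    have hia' : (cu ++ x1 :: (cv ++ x2 :: cw)).findIdx? (fun c => c.contains a)
        = some (cu.length + (1 + cv.length)) := by
      have hshape : cu ++ x1 :: (cv ++ x2 :: cw) = (cu ++ x1 :: cv) ++ x2 :: cw := by
        simp
      rw [hshape, ← hlen1]
      refine findIdx?_prefix_hit _ _ _ _ ?_ ?_
      · intro d hd
        rcases List.mem_append.1 hd with hdu | hdc
        · exact hfalse cu u hcu a ha (fun hm => hc2u (e2 ▸ hm)) d hdu
        · rcases List.mem_cons.1 hdc with rfl | hdv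
          · refine bool_eq_false ?_
            rw [contains_of_perm_filter ks2 ρ a c1 d ha hx1, e1]
            exact hne
          · exact hfalse cv v hcv a ha (fun hm => hc2v (e2 ▸ hm)) d hdv
      · exact htrue x2 c2 hx2 a ha e2.symm
    rw [hia'] at hia
    rw [hib'] at hib
    obtain rfl : cu.length + (1 + cv.length) = ia := Option.some.inj hia
    obtain rfl : cu.length = ib := Option.some.inj hib
    rw [Nat.min_eq_right (by omega), Nat.max_eq_left (by omega)]
    refine ⟨by omega, ?_⟩
    have hg1 : (cu ++ x1 :: (cv ++ x2 :: cw)).getD cu.length [] = x1 :=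
      getD_at_length _ _ _
    have hg2 : (cu ++ x1 :: (cv ++ x2 :: cw)).getD (cu.length + (1 + cv.length)) [] = x2 := by
      have hshape : cu ++ x1 :: (cv ++ x2 :: cw) = (cu ++ x1 :: cv) ++ x2 :: cw := by simp
      rw [hshape, ← hlen1]
      exact getD_at_length _ _ _
    rw [hg1, hg2, set_at_length]
    have hshape2 : cu ++ (x1 ++ x2) :: (cv ++ x2 :: cw)
        = (cu ++ (x1 ++ x2) :: cv) ++ x2 :: cw := by simp
    have hlen2 : (cu ++ (x1 ++ x2) :: cv).length = cu.length + (1 + cv.length) := by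
      simp
      omega
    rw [hshape2, ← hlen2, eraseIdx_at_length, List.append_assoc]
    exact merge_tail ks2 ρ a b c1 c2 u v w cu cv cw x1 x2 hne hroots
      (Or.inr ⟨e1, e2⟩) hcu hx1 hcv hx2 hcw

theorem all_not_contains (ks : List String) (ρ : String → String)
    (comps : List (List String))
    (hsim : List.Forall₂ (fun c v => c.Perm v) comps (canonV ks ρ))
    (x : String) (hx : x ∉ ks) : ∀ c ∈ comps, c.contains x = false := by
  intro c hc
  obtain ⟨y, hy, hr⟩ := forall₂_mem_left hsim c hc
  have hy' : y ∈ (PySem.List.dedup (ks.map ρ)).map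
      (fun r => ks.filter (fun z => decide (ρ z = r))) := hy
  obtain ⟨r, _, rfl⟩ := List.mem_map.1 hy'
  refine bool_eq_false ?_
  rw [contains_true_iff, hr.mem_iff, List.mem_filter]
  rintro ⟨hxk, _⟩
  exact hx hxk

theorem exists_idx (ks : List String) (ρ : String → String)
    (comps : List (List String))
    (hsim : List.Forall₂ (fun c v => c.Perm v) comps (canonV ks ρ))
    (x : String) (hx : x ∈ ks) :
    ∃ i, comps.findIdx? (fun c => c.contains x) = some i := by
  refine findIdx?_isSome_of_exists _ _ ?_
  have hmemC : ks.filter (fun z => decide (ρ z = ρ x)) ∈ canonV ks ρ := by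
    refine List.mem_map.2 ⟨ρ x, ?_, rfl⟩
    rw [PySem.List.dedup_eq_ofList]
    exact (PySem.Set.mem_ofList _ _).2 (List.mem_map_of_mem hx)
  obtain ⟨c, hcmem, hr⟩ := forall₂_mem_right hsim _ hmemC
  exact ⟨c, hcmem, (contains_of_perm_filter ks ρ x (ρ x) c hx hr).2 rfl⟩

theorem same_idx (ks : List String) (ρ : String → String)
    (comps : List (List String))
    (hsim : List.Forall₂ (fun c v => c.Perm v) comps (canonV ks ρ))
    (a b : String) (ha : a ∈ ks) (hb : b ∈ ks) (he : ρ a = ρ b) :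
    comps.findIdx? (fun c => c.contains a) = comps.findIdx? (fun c => c.contains b) := by
  refine findIdx?_congr _ _ _ ?_
  intro c hc
  obtain ⟨y, hy, hr⟩ := forall₂_mem_left hsim c hc
  have hy' : y ∈ (PySem.List.dedup (ks.map ρ)).map
      (fun r => ks.filter (fun z => decide (ρ z = r))) := hy
  obtain ⟨r, _, rfl⟩ := List.mem_map.1 hy'
  have h1 := contains_of_perm_filter ks ρ a r c ha hr
  have h2 := contains_of_perm_filter ks ρ b r c hb hr
  by_cases hρr : ρ a = r
  · rw [h1.2 hρr, h2.2 (he ▸ hρr)]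
  · rw [bool_eq_false (fun ht => hρr (h1.1 ht)),
        bool_eq_false (fun ht => hρr (he ▸ h2.1 ht))]

-- ---- B-side step versus the canonical cluster list ----
theorem canon_step (ks : List String) (ρ : String → String) (a b : String)
    (hρ : ∀ x, x ∉ ks → ρ x = x) (hcl : ∀ x ∈ ks, ρ x ∈ ks)
    (comps : List (List String))
    (hsim : List.Forall₂ (fun c v => c.Perm v) comps (canonV ks ρ)) :
    List.Forall₂ (fun c v => c.Perm v) (stepB comps a b)
      (canonV (addK (addK ks a) b) (mergeρ ρ a b)) := by
  by_cases haks : a ∈ ks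
  · have hks1 : addK ks a = ks := if_pos haks
    obtain ⟨ia, hfa⟩ := exists_idx ks ρ comps hsim a haks
    by_cases hbks : b ∈ ks
    · have hks2 : addK (addK ks a) b = ks := by rw [hks1]; exact if_pos hbks
      obtain ⟨ib, hfb⟩ := exists_idx ks ρ comps hsim b hbks
      by_cases heq : ρ a = ρ b
      · have hiaib : ia = ib := by
          have hcong := same_idx ks ρ comps hsim a b haks hbks heq
          rw [hfa, hfb] at hcong
          exact Option.some.inj hcong
        have hstep : stepB comps a b = comps := by
          simp only [stepB, hfa, hfb]
          simp [hiaib]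
        have hco : canonV ks (mergeρ ρ a b) = canonV ks ρ :=
          canonV_congr _ _ _ (fun z => by unfold mergeρ; rw [if_pos heq])
        rw [hstep, hks2, hco]
        exact hsim
      · obtain ⟨hne', hres⟩ :=
          merge_core ks ρ a b haks hbks heq comps hsim ia ib hfa hfb
        have hstep : stepB comps a b
            = (comps.set (min ia ib) (comps.getD (min ia ib) [] ++ comps.getD (max ia ib) [])).eraseIdx
              (max ia ib) := by
          simp only [stepB, hfa, hfb]
          simp [hne']
        rw [hstep, hks2]
        exact hres
    · have hks2 : addK (addK ks a) b = ks ++ [b] := by rw [hks1]; exact if_neg hbks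
      have hallb : ∀ c ∈ comps, c.contains b = false := all_not_contains ks ρ comps hsim b hbks
      have hfb : comps.findIdx? (fun c => c.contains b) = none := findIdx?_none_of_all _ _ hallb
      have hsim2 : List.Forall₂ (fun c v => c.Perm v) (comps ++ [[b]]) (canonV (ks ++ [b]) ρ) := by
        rw [canonV_fresh ks ρ b hρ hcl hbks]
        exact forall₂_append hsim (List.Forall₂.cons (List.Perm.refl _) List.Forall₂.nil)
      have hρ2 : ∀ x, x ∉ ks ++ [b] → ρ x = x :=
        fun x hx => hρ x (fun h => hx (List.mem_append.2 (Or.inl h)))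
      have hcl2 : ∀ x ∈ ks ++ [b], ρ x ∈ ks ++ [b] := by
        intro x hx
        rcases List.mem_append.1 hx with h | h
        · exact List.mem_append.2 (Or.inl (hcl x h))
        · simp only [List.mem_singleton] at h
          rw [h, hρ b hbks]
          simp
      have hneq : ρ a ≠ ρ b := by
        rw [hρ b hbks]
        exact fun e => hbks (e ▸ hcl a haks)
      have hfa2 : (comps ++ [[b]]).findIdx? (fun c => c.contains a) = some ia :=
        findIdx?_append_some _ _ _ ia hfa
      have hfb2 : (comps ++ [[b]]).findIdx? (fun c => c.contains b) = some comps.length :=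
        findIdx?_prefix_hit _ _ _ _ hallb (by simp)
      obtain ⟨hne', hres⟩ := merge_core (ks ++ [b]) ρ a b
        (List.mem_append.2 (Or.inl haks)) (by simp) hneq (comps ++ [[b]]) hsim2
        ia comps.length hfa2 hfb2
      have hstep : stepB comps a b
          = ((comps ++ [[b]]).set (min ia comps.length)
              ((comps ++ [[b]]).getD (min ia comps.length) []
                ++ (comps ++ [[b]]).getD (max ia comps.length) [])).eraseIdx
            (max ia comps.length) := by
        simp only [stepB, hfa, hfb]
        simp [hne']
      rw [hstep, hks2]
      exact hres
  · have hks1 : addK ks a = ks ++ [a] := if_neg haks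
    have halla : ∀ c ∈ comps, c.contains a = false := all_not_contains ks ρ comps hsim a haks
    have hfa : comps.findIdx? (fun c => c.contains a) = none := findIdx?_none_of_all _ _ halla
    have hsim1 : List.Forall₂ (fun c v => c.Perm v) (comps ++ [[a]]) (canonV (ks ++ [a]) ρ) := by
      rw [canonV_fresh ks ρ a hρ hcl haks]
      exact forall₂_append hsim (List.Forall₂.cons (List.Perm.refl _) List.Forall₂.nil)
    have hρ1 : ∀ x, x ∉ ks ++ [a] → ρ x = x :=
      fun x hx => hρ x (fun h => hx (List.mem_append.2 (Or.inl h)))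
    have hcl1 : ∀ x ∈ ks ++ [a], ρ x ∈ ks ++ [a] := by
      intro x hx
      rcases List.mem_append.1 hx with h | h
      · exact List.mem_append.2 (Or.inl (hcl x h))
      · simp only [List.mem_singleton] at h
        rw [h, hρ a haks]
        simp
    have hfa1 : (comps ++ [[a]]).findIdx? (fun c => c.contains a) = some comps.length :=
      findIdx?_prefix_hit _ _ _ _ halla (by simp)
    by_cases hba : b = a
    · have hfb1 : (comps ++ [[a]]).findIdx? (fun c => c.contains b) = some comps.length := by
        rw [hba]
        exact hfa1
      have hstep : stepB comps a b = comps ++ [[a]] := by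
        simp only [stepB, hfa, hfb1]
        simp
      have hks2 : addK (addK ks a) b = ks ++ [a] := by
        rw [hks1, hba]
        exact if_pos (by simp)
      have hco : canonV (ks ++ [a]) (mergeρ ρ a b) = canonV (ks ++ [a]) ρ := by
        refine canonV_congr _ _ _ (fun z => ?_)
        unfold mergeρ
        rw [hba, if_pos rfl]
      rw [hstep, hks2, hco]
      exact hsim1
    · by_cases hbks : b ∈ ks
      · obtain ⟨ib, hfb0⟩ := exists_idx ks ρ comps hsim b hbks
        have hfb1 : (comps ++ [[a]]).findIdx? (fun c => c.contains b) = some ib :=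
          findIdx?_append_some _ _ _ ib hfb0
        have hks2 : addK (addK ks a) b = ks ++ [a] := by
          rw [hks1]
          exact if_pos (by simp [hbks])
        have hneq : ρ a ≠ ρ b := by
          intro e
          apply haks
          rw [hρ a haks] at e
          rw [e]
          exact hcl b hbks
        obtain ⟨hne', hres⟩ := merge_core (ks ++ [a]) ρ a b (by simp)
          (List.mem_append.2 (Or.inl hbks)) hneq (comps ++ [[a]]) hsim1
          comps.length ib hfa1 hfb1
        have hstep : stepB comps a b
            = ((comps ++ [[a]]).set (min comps.length ib)
                ((comps ++ [[a]]).getD (min comps.length ib) []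
                  ++ (comps ++ [[a]]).getD (max comps.length ib) [])).eraseIdx
              (max comps.length ib) := by
          simp only [stepB, hfa, hfb1]
          simp [hne']
        rw [hstep, hks2]
        exact hres
      · have hbks1 : b ∉ ks ++ [a] := by simp [hbks, hba]
        have hfb1 : (comps ++ [[a]]).findIdx? (fun c => c.contains b) = none :=
          findIdx?_none_of_all _ _ (all_not_contains (ks ++ [a]) ρ _ hsim1 b hbks1)
        have hks2 : addK (addK ks a) b = (ks ++ [a]) ++ [b] := by
          rw [hks1]
          exact if_neg hbks1
        have hsim2 : List.Forall₂ (fun c v => c.Perm v) ((comps ++ [[a]]) ++ [[b]])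
            (canonV ((ks ++ [a]) ++ [b]) ρ) := by
          rw [canonV_fresh (ks ++ [a]) ρ b hρ1 hcl1 hbks1]
          exact forall₂_append hsim1 (List.Forall₂.cons (List.Perm.refl _) List.Forall₂.nil)
        have hρ2 : ∀ x, x ∉ (ks ++ [a]) ++ [b] → ρ x = x :=
          fun x hx => hρ1 x (fun h => hx (List.mem_append.2 (Or.inl h)))
        have hcl2 : ∀ x ∈ (ks ++ [a]) ++ [b], ρ x ∈ (ks ++ [a]) ++ [b] := by
          intro x hx
          rcases List.mem_append.1 hx with h | h
          · exact List.mem_append.2 (Or.inl (hcl1 x h))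
          · simp only [List.mem_singleton] at h
            rw [h, hρ1 b hbks1]
            simp
        have hneq : ρ a ≠ ρ b := by
          rw [hρ a haks, hρ b hbks]
          exact fun e => hba e.symm
        have hfa2 : ((comps ++ [[a]]) ++ [[b]]).findIdx? (fun c => c.contains a)
            = some comps.length := findIdx?_append_some _ _ _ _ hfa1
        have hfb2 : ((comps ++ [[a]]) ++ [[b]]).findIdx? (fun c => c.contains b)
            = some (comps ++ [[a]]).length :=
          findIdx?_prefix_hit _ _ _ _ (all_not_contains (ks ++ [a]) ρ _ hsim1 b hbks1) (by simp)
        obtain ⟨hne', hres⟩ := merge_core ((ks ++ [a]) ++ [b]) ρ a b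
          (by simp) (by simp) hneq ((comps ++ [[a]]) ++ [[b]]) hsim2
          comps.length (comps ++ [[a]]).length hfa2 hfb2
        have hstep : stepB comps a b
            = (((comps ++ [[a]]) ++ [[b]]).set (min comps.length (comps ++ [[a]]).length)
                (((comps ++ [[a]]) ++ [[b]]).getD (min comps.length (comps ++ [[a]]).length) []
                  ++ ((comps ++ [[a]]) ++ [[b]]).getD (max comps.length (comps ++ [[a]]).length) [])).eraseIdx
              (max comps.length (comps ++ [[a]]).length) := by
          simp only [stepB, hfa, hfb1]
          simp
        rw [hstep, hks2]
        exact hres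

-- ---- the grouping pass of A computes canonV ----
theorem groupFold_items (ks : List String) (ρ : String → String) :
    (ks.foldl (fun (g : PySem.Dict String (List String)) x =>
        g.insert (ρ x) (g.getD (ρ x) [] ++ [x])) PySem.Dict.empty).items
      = (PySem.List.dedup (ks.map ρ)).map
          (fun r => (r, ks.filter (fun x => decide (ρ x = r)))) := by
  induction ks using List.reverseRecOn with
  | nil => rfl
  | append_singleton l x ih =>
    rw [List.foldl_append]
    simp only [List.foldl_cons, List.foldl_nil]
    have hkeys_g : (l.foldl (fun (g : PySem.Dict String (List String)) x =>
        g.insert (ρ x) (g.getD (ρ x) [] ++ [x])) PySem.Dict.empty).keys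
        = PySem.List.dedup (l.map ρ) := by
      show ((l.foldl (fun (g : PySem.Dict String (List String)) x =>
        g.insert (ρ x) (g.getD (ρ x) [] ++ [x])) PySem.Dict.empty).items).map Prod.fst = _
      rw [ih, List.map_map]
      have hid : (Prod.fst ∘ fun r => (r, List.filter (fun x => decide (ρ x = r)) l))
          = fun r => r := rfl
      rw [hid]
      exact List.map_id' _
    have hnodupg : (l.foldl (fun (g : PySem.Dict String (List String)) x =>
        g.insert (ρ x) (g.getD (ρ x) [] ++ [x])) PySem.Dict.empty).keys.Nodup := by
      rw [hkeys_g, PySem.List.dedup_eq_ofList]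
      exact PySem.Set.nodup_ofList _
    rw [List.map_append]
    simp only [List.map_cons, List.map_nil]
    rw [dedup_append_singleton]
    by_cases hmem : ρ x ∈ l.map ρ
    · rw [if_pos hmem]
      have hcont : (l.foldl (fun (g : PySem.Dict String (List String)) x =>
          g.insert (ρ x) (g.getD (ρ x) [] ++ [x])) PySem.Dict.empty).contains (ρ x) = true := by
        rw [PySem.Dict.contains_eq_decide_mem_keys, hkeys_g]
        simp [PySem.List.dedup_eq_ofList, (PySem.Set.mem_ofList _ _).2 hmem]
      have hgetD : (l.foldl (fun (g : PySem.Dict String (List String)) x =>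
          g.insert (ρ x) (g.getD (ρ x) [] ++ [x])) PySem.Dict.empty).getD (ρ x) []
          = l.filter (fun z => decide (ρ z = ρ x)) := by
        apply PySem.Dict.getD_of_mem_items _ ?_ hnodupg
        rw [ih]
        exact List.mem_map_of_mem (by
          rw [PySem.List.dedup_eq_ofList]
          exact (PySem.Set.mem_ofList _ _).2 hmem)
      rw [PySem.Dict.items_insert_of_contains _ _ hcont, ih, hgetD, List.map_map]
      refine List.map_congr_left ?_
      intro r hr
      by_cases hrx : r = ρ x
      · simp [Function.comp, hrx, List.filter_append]
      · simp [Function.comp, hrx, List.filter_append, Ne.symm hrx]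
    · rw [if_neg hmem]
      have hcont : (l.foldl (fun (g : PySem.Dict String (List String)) x =>
          g.insert (ρ x) (g.getD (ρ x) [] ++ [x])) PySem.Dict.empty).contains (ρ x) = false := by
        rw [PySem.Dict.contains_eq_decide_mem_keys, hkeys_g, PySem.List.dedup_eq_ofList]
        simp only [decide_eq_false_iff_not]
        intro h
        exact hmem ((PySem.Set.mem_ofList _ _).1 h)
      have hgetD : (l.foldl (fun (g : PySem.Dict String (List String)) x =>
          g.insert (ρ x) (g.getD (ρ x) [] ++ [x])) PySem.Dict.empty).getD (ρ x) [] = [] :=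
        PySem.Dict.getD_of_not_contains _ _ hcont
      rw [PySem.Dict.items_insert_of_not_contains _ _ hcont, ih, hgetD, List.map_append]
      congr 1
      · refine List.map_congr_left ?_
        intro r hr
        have hrρ : r ∈ l.map ρ := by
          rw [PySem.List.dedup_eq_ofList] at hr
          exact (PySem.Set.mem_ofList _ _).1 hr
        have hrx : ¬ (ρ x = r) := fun h => hmem (h ▸ hrρ)
        simp [List.filter_append, hrx]
      · simp only [List.map_cons, List.map_nil, List.nil_append]
        have hfilter : l.filter (fun z => decide (ρ z = ρ x)) = [] := by
          rw [List.filter_eq_nil_iff]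
          intro z hz
          simp only [decide_eq_true_eq]
          intro h
          exact hmem (h ▸ List.mem_map_of_mem hz)
        simp [List.filter_append, hfilter]

theorem groupFold_values (ks : List String) (ρ : String → String) :
    (ks.foldl (fun (g : PySem.Dict String (List String)) x =>
        g.insert (ρ x) (g.getD (ρ x) [] ++ [x])) PySem.Dict.empty).values
      = canonV ks ρ := by
  show ((ks.foldl (fun (g : PySem.Dict String (List String)) x =>
      g.insert (ρ x) (g.getD (ρ x) [] ++ [x])) PySem.Dict.empty).items).map Prod.snd = _
  rw [groupFold_items, List.map_map]
  rfl

theorem groupPhase_spec (parent : PySem.Dict String String) (hwf : WFP parent) :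
    (parent.keys.foldl
      (fun (st : PySem.Dict String (List String) × PySem.Dict String String) x =>
        let r := (findA st.2 x).1
        let p' := (findA st.2 x).2
        (st.1.insert r (st.1.getD r [] ++ [x]), p'))
      (PySem.Dict.empty, parent)).1.values
    = canonV parent.keys (RtP parent) := by
  have gen : ∀ (xs : List String) (g : PySem.Dict String (List String))
      (p : PySem.Dict String String), WFP p → (∀ z, RtP p z = RtP parent z) →
      (∀ x ∈ xs, x ∈ p.keys) →
      (xs.foldl
        (fun (st : PySem.Dict String (List String) × PySem.Dict String String) x =>
          let r := (findA st.2 x).1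
          let p' := (findA st.2 x).2
          (st.1.insert r (st.1.getD r [] ++ [x]), p'))
        (g, p)).1
      = xs.foldl (fun (g : PySem.Dict String (List String)) x =>
          g.insert (RtP parent x) (g.getD (RtP parent x) [] ++ [x])) g := by
    intro xs
    induction xs with
    | nil => intro g p _ _ _; rfl
    | cons x xs ih =>
      intro g p hwfp hragree hmem
      simp only [List.foldl_cons]
      obtain ⟨f1, f2, f3, f4⟩ := findA_spec p x hwfp
      have hxk : x ∈ p.keys := hmem x (by simp)
      have hr : (findA p x).1 = RtP parent x := by rw [f1, hragree x]
      have hkeysf : (findA p x).2.keys = p.keys := by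
        rw [f3, addK, if_pos hxk]
      rw [hr]
      exact ih _ _ f2 (fun z => by rw [f4 z, hragree z])
        (fun z hz => by rw [hkeysf]; exact hmem z (by simp [hz]))
  rw [gen parent.keys PySem.Dict.empty parent hwf (fun z => rfl) (fun z hz => hz)]
  exact groupFold_values parent.keys (RtP parent)

-- ---- joint invariant along the pair fold ----
theorem fold_inv (rp : List (String × String)) :
    WFP (rp.foldl (fun p ab => unionA p ab.1 ab.2) PySem.Dict.empty) ∧
    List.Forall₂ (fun c v => c.Perm v)
      (rp.foldl (fun cs ab => stepB cs ab.1 ab.2) [])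
      (canonV (rp.foldl (fun p ab => unionA p ab.1 ab.2) PySem.Dict.empty).keys
              (RtP (rp.foldl (fun p ab => unionA p ab.1 ab.2) PySem.Dict.empty))) := by
  have gen : ∀ (rp : List (String × String)) (p : PySem.Dict String String)
      (comps : List (List String)), WFP p →
      List.Forall₂ (fun c v => c.Perm v) comps (canonV p.keys (RtP p)) →
      WFP (rp.foldl (fun p ab => unionA p ab.1 ab.2) p) ∧
      List.Forall₂ (fun c v => c.Perm v)
        (rp.foldl (fun cs ab => stepB cs ab.1 ab.2) comps)
        (canonV (rp.foldl (fun p ab => unionA p ab.1 ab.2) p).keys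
                (RtP (rp.foldl (fun p ab => unionA p ab.1 ab.2) p))) := by
    intro rp
    induction rp with
    | nil => intro p comps h1 h2; exact ⟨h1, h2⟩
    | cons ab rp ih =>
      intro p comps h1 h2
      simp only [List.foldl_cons]
      obtain ⟨uwf, ukeys, urt⟩ := unionA_spec p ab.1 ab.2 h1
      refine ih _ _ uwf ?_
      have hfun : RtP (unionA p ab.1 ab.2) = mergeρ (RtP p) ab.1 ab.2 := funext urt
      rw [hfun, ukeys]
      exact canon_step p.keys (RtP p) ab.1 ab.2
        (fun x hx => RtP_of_not_mem p x hx)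
        (fun x hx => RtP_mem_keys p h1 x hx) comps h2
  have h0 : canonV (PySem.Dict.empty : PySem.Dict String String).keys
      (RtP (PySem.Dict.empty : PySem.Dict String String)) = [] := by
    simp [canonV, PySem.Dict.keys_empty]
  exact gen rp PySem.Dict.empty [] WFP_empty (h0 ▸ List.Forall₂.nil)

-- ---- final filter/sort pass respects positionwise permutation ----
theorem out_congr (l₁ l₂ : List (List String))
    (h : List.Forall₂ (fun c v => c.Perm v) l₁ l₂) :
    (l₁.filter (fun v => decide (2 ≤ v.length))).map
        (fun v => PySem.List.sorted v (fun s => s) false)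
      = (l₂.filter (fun v => decide (2 ≤ v.length))).map
        (fun v => PySem.List.sorted v (fun s => s) false) := by
  induction h with
  | nil => rfl
  | @cons a b l1 l2 hab h ih =>
    have hlen : a.length = b.length := hab.length_eq
    simp only [List.filter_cons]
    by_cases h2 : 2 ≤ a.length
    · rw [if_pos (by simpa using h2), if_pos (by simp [← hlen]; omega)]
      simp only [List.map_cons]
      rw [ih]
      congr 1
      exact (PySem.List.sorted_id_eq_sorted_id_iff_perm a b).2 hab
    · rw [if_neg (by simpa using h2), if_neg (by simp [← hlen]; omega)]
      exact ih

-- ===== VERDICT (by name: the statement is the Claim_ definition above) =====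
theorem build_clusters_from_pairs_spec : Claim_equal_build_clusters_from_pairs := by
  intro rp _
  unfold Spec_build_clusters_from_pairs build_clusters_from_pairs build_clusters_from_pairs_alt
  obtain ⟨hwf, hsim⟩ := fold_inv rp
  simp only [groupPhase_spec _ hwf]
  exact (out_congr _ _ hsim).symm
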